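-- pv_equiv track=rewrite | github.com/ErickMwazonga/sifu | prefix_sum/1d/min_cost_to_reach_friend.py | min_total_cost
-- ===== SOURCE A (Python) =====
-- from collections import defaultdict
--
-- def min_total_cost(nums):
--     n = len(nums)
--
--     # Step 1: Compute prefix sum
--     prefix = [0] * (n + 1)
--     for i in range(n):
--         prefix[i + 1] = prefix[i] + nums[i]
--
--     # Step 2: Group indices by number
--     indices_by_number = defaultdict(list)
--     for i, num in enumerate(nums):
--         indices_by_number[num].append(i)
--
--     total_cost = 0
--
--     # Step 3: For each group of same numbers, compute minimum pairwise cost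
--     for num, indices in indices_by_number.items():
--         if len(indices) < 2:
--             continue  # Only one friend, skip
--
--         min_cost = float('inf')
--         for i in range(len(indices) - 1):
--             for j in range(i + 1, len(indices)):
--                 left, right = indices[i], indices[j]
--                 cost = prefix[right] - prefix[left + 1]
--                 min_cost = min(min_cost, max(0, cost))
--
--         total_cost += min_cost
--
--     return total_cost
-- ===== SOURCE B (Python) =====
-- def min_total_cost(nums):
--     # One pass: per value track the max of prefix[i+1] over earlier occurrences
--     # and the running minimum pairwise cost; then sum max(0, best) per group.
--     groups = {}
--     p = 0
--     for x in nums: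
--         cur = groups.get(x)
--         if cur is None:
--             groups[x] = (p + x, None)
--         else:
--             mx, best = cur
--             cand = p - mx
--             if best is None or cand < best:
--                 best = cand
--             groups[x] = (max(mx, p + x), best)
--         p += x
--     total = 0
--     for mx, best in groups.values():
--         if best is not None:
--             total += max(0, best)
--     return total
-- ===== Notes on version B (the rewrite author's own statement) =====
-- stated objective: faster
-- what changed: Replaced the quadratic per-group pairwise scan (all index pairs of each equal-value group) by a single left-to-right pass that per value tracks the maximum prefix[i+1] over earlier occurrences, so the minimum pairwise cost of each group falls out of one pass over the input (and the separate prefix array and index lists disappear).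
import Mathlib
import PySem

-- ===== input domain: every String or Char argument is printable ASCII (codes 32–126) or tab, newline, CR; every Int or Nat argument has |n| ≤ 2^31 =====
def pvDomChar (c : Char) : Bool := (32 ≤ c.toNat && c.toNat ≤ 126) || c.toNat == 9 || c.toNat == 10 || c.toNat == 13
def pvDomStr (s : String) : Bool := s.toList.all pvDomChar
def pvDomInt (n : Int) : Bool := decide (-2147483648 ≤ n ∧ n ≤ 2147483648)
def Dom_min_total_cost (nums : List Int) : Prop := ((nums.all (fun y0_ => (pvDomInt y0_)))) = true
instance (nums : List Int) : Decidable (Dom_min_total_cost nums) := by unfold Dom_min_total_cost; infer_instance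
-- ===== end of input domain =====

-- B replaces A's quadratic per-group pairwise scan by one left-to-right pass that tracks, per value,
-- the maximum prefix[i+1] over earlier occurrences (objective: faster).


-- ===== PORT A =====
-- min(min_cost, max(0, cost)) with min_cost starting at float('inf'): Option Int, none = inf
def pvMinO (a : Option Int) (v : Int) : Option Int :=
  some (match a with | none => v | some m => min m v)

-- proof-side defs

def min_total_cost (nums : List Int) : Int :=
  let n : Int := (nums.length : Int)
  let prefixL : List Int :=
    (PySem.List.pyRange 0 n 1).foldl
      (fun pr i => pr.set (i + 1).toNat (PySem.List.pyGetD pr i 0 + PySem.List.pyGetD nums i 0))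
      (List.replicate (n.toNat + 1) 0)
  let d : PySem.Dict Int (List Int) :=
    (PySem.List.enumerate nums 0).foldl
      (fun d p => d.modify p.2 [] (fun l => l ++ [p.1])) PySem.Dict.empty
  d.items.foldl
    (fun total p =>
      let indices := p.2
      if (indices.length : Int) < 2 then total
      else
        let mc : Option Int :=
          (PySem.List.pyRange 0 ((indices.length : Int) - 1) 1).foldl
            (fun mc i =>
              (PySem.List.pyRange (i + 1) (indices.length : Int) 1).foldl
                (fun mc j =>
                  let left := PySem.List.pyGetD indices i 0
                  let right := PySem.List.pyGetD indices j 0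
                  let cost := PySem.List.pyGetD prefixL right 0
                              - PySem.List.pyGetD prefixL (left + 1) 0
                  pvMinO mc (max 0 cost)) mc) none
        total + mc.getD 0)
    0

-- ===== PORT B =====
-- loop body of B: cur = groups.get(x); …; groups[x] = …; p += x
def pvStepB (s : PySem.Dict Int (Int × Option Int) × Int) (x : Int) :
    PySem.Dict Int (Int × Option Int) × Int :=
  let groups := s.1
  let p := s.2
  match groups.get? x with
  | none => (groups.insert x (p + x, none), p + x)
  | some (mx, best) =>
    let cand := p - mx
    let best' := match best with
      | none => some cand
      | some b => if cand < b then some cand else some b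
    (groups.insert x (max mx (p + x), best'), p + x)

def min_total_cost_alt (nums : List Int) : Int :=
  let st := nums.foldl pvStepB (PySem.Dict.empty, 0)
  st.1.values.foldl
    (fun total v =>
      match v.2 with
      | none => total
      | some b => total + max 0 b) 0

-- ===== PRECONDITION & SPEC =====
def Spec_min_total_cost (nums : List Int) (out : Int) : Prop := out = min_total_cost_alt nums
instance (nums : List Int) (out : Int) : Decidable (Spec_min_total_cost nums out) := by unfold Spec_min_total_cost; infer_instance

-- ===== CLAIM (what is proved, stated in full; the proofs are below) =====
def Claim_equal_min_total_cost : Prop := ∀ (nums : List Int), Dom_min_total_cost nums → Spec_min_total_cost nums (min_total_cost nums)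

-- ===== LEMMAS AND PROOFS =====
def pvPfx (nums : List Int) (j : Nat) : Int := (nums.take j).sum

def pvOcc : List Int → Int → List Nat
  | [], _ => []
  | x :: xs, k => (if x = k then [0] else []) ++ (pvOcc xs k).map (· + 1)

def pvOccI (nums : List Int) (k : Int) : List Int := List.map (fun j : Nat => (j : Int)) (pvOcc nums k)

def pvQs (nums : List Int) (k : Int) : List Int := (pvOcc nums k).map (fun j => pvPfx nums j)

def pvComb : Option Int → Option Int → Option Int
  | a, none => a
  | none, some b => some b
  | some a, some b => some (min a b)

def pvM (L : List Int) : Option Int := L.foldl pvMinO none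

def pvApv : List Int → Int → List Int
  | [], _ => []
  | q :: rest, k => rest.map (fun r => r - q - k) ++ pvApv rest k

theorem pvComb_none_right (a : Option Int) : pvComb a none = a := by cases a <;> rfl
theorem pvComb_none_left (a : Option Int) : pvComb none a = a := by cases a <;> rfl
theorem pvMinO_eq (a : Option Int) (v : Int) : pvMinO a v = pvComb a (some v) := by cases a <;> rfl
theorem pvComb_assoc (a b c : Option Int) : pvComb (pvComb a b) c = pvComb a (pvComb b c) := by
  cases a <;> cases b <;> cases c <;> simp [pvComb, min_assoc]
theorem pvComb_comm (a b : Option Int) : pvComb a b = pvComb b a := by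
  cases a <;> cases b <;> simp [pvComb, min_comm]
theorem pvComb_left_comm (a b c : Option Int) : pvComb a (pvComb b c) = pvComb b (pvComb a c) := by
  rw [← pvComb_assoc, pvComb_comm a b, pvComb_assoc]

theorem pvFoldl_minO (L : List Int) : ∀ a, L.foldl pvMinO a = pvComb a (pvM L) := by
  induction L with
  | nil => intro a; simp [pvM, pvComb_none_right]
  | cons q L ih =>
    intro a
    simp only [pvM, List.foldl_cons] at *
    rw [ih (pvMinO a q), ih (pvMinO none q), pvMinO_eq, pvMinO_eq, pvComb_none_left, pvComb_assoc]

theorem pvM_cons (q : Int) (L : List Int) : pvM (q :: L) = pvComb (some q) (pvM L) := by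
  simp only [pvM, List.foldl_cons]
  rw [pvFoldl_minO, pvMinO_eq, pvComb_none_left]; rfl

theorem pvM_append (L1 L2 : List Int) : pvM (L1 ++ L2) = pvComb (pvM L1) (pvM L2) := by
  simp only [pvM, List.foldl_append]
  rw [pvFoldl_minO]; rfl

theorem pvM_map_min (L : List Int) (f g : Int → Int) :
    pvM (L.map (fun r => min (f r) (g r))) = pvComb (pvM (L.map f)) (pvM (L.map g)) := by
  induction L with
  | nil => simp [pvM, pvComb]
  | cons q L ih =>
    simp only [List.map_cons, pvM_cons, ih]
    have h : (some (min (f q) (g q)) : Option Int) = pvComb (some (f q)) (some (g q)) := rfl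
    rw [h, pvComb_assoc, pvComb_left_comm (some (g q)), ← pvComb_assoc]

theorem pvM_map_max0 (L : List Int) :
    pvM (L.map (fun v => max 0 v)) = (pvM L).map (fun b => max 0 b) := by
  induction L with
  | nil => simp [pvM]
  | cons q L ih =>
    simp only [List.map_cons, pvM_cons, ih]
    cases h : pvM L <;> simp [pvComb, max_min_distrib_left]


theorem pvRange_nil {a b : Int} (h : b ≤ a) : PySem.List.pyRange a b = [] := by
  rw [PySem.List.pyRange_of_pos a b (by norm_num : (0:Int) < 1)]
  simp [show ¬ a < b by omega]

theorem pvRange_shift (a b : Int) :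
    PySem.List.pyRange (a + 1) (b + 1) = (PySem.List.pyRange a b).map (· + 1) := by
  rw [PySem.List.pyRange_of_pos a b (by norm_num : (0:Int) < 1),
      PySem.List.pyRange_of_pos (a+1) (b+1) (by norm_num : (0:Int) < 1), List.map_map]
  rw [show b + 1 - (a + 1) + 1 - 1 = b - a + 1 - 1 by ring]
  simp only [show (a + 1 < b + 1) ↔ (a < b) by omega]
  apply List.map_congr_left
  intro k _
  simp only [Function.comp_apply]
  ring

theorem pvGetD_cons_shift (x : Int) (xs : List Int) (i : Int) (h : 0 ≤ i) (d : Int) :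
    PySem.List.pyGetD (x :: xs) (i + 1) d = PySem.List.pyGetD xs i d := by
  rw [PySem.List.pyGetD_of_nonneg _ _ (by omega), PySem.List.pyGetD_of_nonneg _ _ h]
  rw [show (i+1).toNat = i.toNat + 1 by omega]
  rfl

theorem pvFoldl_getD_range (xs : List Int) {β : Type} (g : β → Int → β) (a : β) :
    (PySem.List.pyRange 0 (xs.length : Int)).foldl (fun acc j => g acc (PySem.List.pyGetD xs j 0)) a
      = xs.foldl g a := by
  conv_rhs => rw [← PySem.List.map_pyGetD_pyRange_zero xs 0]
  rw [List.foldl_map]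
  rfl

def pvCore (qs : List Int) (k : Int) (a : Option Int) : Option Int :=
  (PySem.List.pyRange 0 ((qs.length : Int) - 1)).foldl
    (fun mc i =>
      (PySem.List.pyRange (i + 1) ((qs.length : Int))).foldl
        (fun mc j => pvMinO mc (max 0 (PySem.List.pyGetD qs j 0 - (PySem.List.pyGetD qs i 0 + k)))) mc) a

theorem pvCore_eq (qs : List Int) (k : Int) : ∀ a,
    pvCore qs k a = pvComb a (pvM ((pvApv qs k).map (fun v => max 0 v))) := by
  induction qs with
  | nil =>
    intro a
    simp only [pvCore, List.length_nil, Nat.cast_zero, pvApv, List.map_nil]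
    rw [pvRange_nil (by norm_num), List.foldl_nil]
    simp [pvM, pvComb_none_right]
  | cons q rest ih =>
    intro a
    rcases rest with _ | ⟨r, rs⟩
    · simp only [pvCore, List.length_cons, List.length_nil, pvApv, List.map_nil]
      rw [pvRange_nil (by norm_num), List.foldl_nil]
      simp [pvM, pvComb_none_right]
    · set rest := r :: rs with hrest
      set L : Int := (rest.length : Int) with hL
      have hL1 : 1 ≤ L := by simp [hL, hrest]
      have hlen : ((q :: rest).length : Int) = L + 1 := by simp [hL]
      -- the subexpression q+k version of part0
      set part0 : List Int := rest.map (fun v => max 0 (v - q - k)) with hpart0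
      have step0 : ∀ (b : Option Int),
          (PySem.List.pyRange (0 + 1) (L + 1)).foldl
            (fun mc j => pvMinO mc (max 0 (PySem.List.pyGetD (q :: rest) j 0
              - (PySem.List.pyGetD (q :: rest) 0 0 + k)))) b
          = pvComb b (pvM part0) := by
        intro b
        rw [pvRange_shift 0 L, List.foldl_map]
        rw [PySem.List.foldl_congr_mem _ _
          (fun mc j => pvMinO mc (max 0 (PySem.List.pyGetD rest j 0 - (q + k)))) b
          (by
            intro acc x hx
            have hx0 : 0 ≤ x := (PySem.List.mem_pyRange_one.mp hx).1
            rw [pvGetD_cons_shift _ _ _ hx0]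
            norm_num [PySem.List.pyGetD_natCast])]
        rw [pvFoldl_getD_range rest (fun mc v => pvMinO mc (max 0 (v - (q + k)))) b]
        have : rest.foldl (fun mc v => pvMinO mc (max 0 (v - (q + k)))) b
            = part0.foldl pvMinO b := by
          rw [hpart0, List.foldl_map]
          apply PySem.List.foldl_congr_mem
          intro acc x _
          ring_nf
        rw [this, pvFoldl_minO]
      have stepRest : ∀ (b : Option Int),
          (PySem.List.pyRange 1 L).foldl
            (fun mc i =>
              (PySem.List.pyRange (i + 1) (L + 1)).foldl
                (fun mc j => pvMinO mc (max 0 (PySem.List.pyGetD (q :: rest) j 0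
                  - (PySem.List.pyGetD (q :: rest) i 0 + k)))) mc) b
          = pvCore rest k b := by
        intro b
        have : PySem.List.pyRange 1 L = (PySem.List.pyRange 0 (L - 1)).map (· + 1) := by
          have := pvRange_shift 0 (L - 1)
          rw [show L - 1 + 1 = L by ring] at this
          simpa using this
        rw [this, List.foldl_map]
        unfold pvCore
        rw [← hL]
        apply PySem.List.foldl_congr_mem
        intro acc i hi
        have hi0 : 0 ≤ i := (PySem.List.mem_pyRange_one.mp hi).1
        rw [show i + 1 + 1 = (i + 1) + 1 by ring, pvRange_shift (i + 1) L, List.foldl_map]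
        apply PySem.List.foldl_congr_mem
        intro acc2 j hj
        have hj0 : 0 ≤ j := by
          have := (PySem.List.mem_pyRange_one.mp hj).1; omega
        rw [pvGetD_cons_shift _ _ _ hj0, pvGetD_cons_shift _ _ _ hi0]
      -- assemble
      show (PySem.List.pyRange 0 (((q :: rest).length : Int) - 1)).foldl _ a = _
      rw [hlen, show L + 1 - 1 = L by ring,
          PySem.List.pyRange_one_cons (by omega : (0:Int) < L), List.foldl_cons]
      rw [step0 a, show (0:Int) + 1 = 1 by norm_num, stepRest, ih]
      rw [show pvApv (q :: rest) k = rest.map (fun v => v - q - k) ++ pvApv rest k from rfl]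
      rw [List.map_append, List.map_map]
      rw [show ((fun v => max 0 v) ∘ fun v => v - q - k) = (fun v => max 0 (v - q - k)) from rfl]
      rw [← hpart0, pvM_append, pvComb_assoc]

def pvHF (k : Int) : Int × Option Int → List Int → Int × Option Int
  | st, [] => st
  | (mx, best), q :: qs => pvHF k (max mx (q + k), pvMinO best (q - mx)) qs

def pvHFO (k : Int) : Option (Int × Option Int) → List Int → Option (Int × Option Int)
  | none, [] => none
  | none, q :: qs => some (pvHF k (q + k, none) qs)
  | some st, qs => some (pvHF k st qs)

def pvOccP : List Int → Int → Int → List Int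
  | [], _, _ => []
  | x :: ys, p, k => (if x = k then [p] else []) ++ pvOccP ys (p + x) k

theorem pvHF_snd (k : Int) (qs : List Int) : ∀ mx best,
    (pvHF k (mx, best) qs).2
      = pvComb best (pvComb (pvM (qs.map (fun r => r - mx))) (pvM (pvApv qs k))) := by
  induction qs with
  | nil =>
    intro mx best
    show best = pvComb best (pvComb (pvM []) (pvM (pvApv [] k)))
    rw [show pvApv [] k = [] from rfl]
    rw [show pvM [] = none from rfl, pvComb_none_left, pvComb_none_right]
  | cons q rest ih =>
    intro mx best
    rw [show pvHF k (mx, best) (q :: rest)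
        = pvHF k (max mx (q + k), pvMinO best (q - mx)) rest from rfl, ih]
    have h1 : rest.map (fun r => r - max mx (q + k))
        = rest.map (fun r => min (r - mx) (r - (q + k))) := by
      apply List.map_congr_left; intro r _; omega
    rw [h1, pvM_map_min]
    rw [show (q :: rest).map (fun r => r - mx) = (q - mx) :: rest.map (fun r => r - mx) from rfl,
        pvM_cons]
    rw [show pvApv (q :: rest) k = rest.map (fun r => r - q - k) ++ pvApv rest k from rfl,
        pvM_append]
    have h2 : rest.map (fun r => r - (q + k)) = rest.map (fun r => r - q - k) := by
      apply List.map_congr_left; intro r _; ring_nf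
    rw [h2, pvMinO_eq]
    simp only [pvComb_assoc]

theorem pvHF_group (k q : Int) (rest : List Int) :
    (pvHF k (q + k, none) rest).2 = pvM (pvApv (q :: rest) k) := by
  rw [pvHF_snd, pvComb_none_left]
  have h2 : rest.map (fun r => r - (q + k)) = rest.map (fun r => r - q - k) := by
    apply List.map_congr_left; intro r _; ring_nf
  rw [show pvApv (q :: rest) k = rest.map (fun r => r - q - k) ++ pvApv rest k from rfl,
      pvM_append, ← h2]

theorem pvBestUpd (best : Option Int) (c : Int) :
    (match best with
      | none => some c
      | some b => if c < b then some c else some b) = pvMinO best c := by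
  cases best with
  | none => rfl
  | some b => simp only [pvMinO]; split_ifs <;> simp <;> omega

theorem pvStepB_get (ys : List Int) : ∀ (d : PySem.Dict Int (Int × Option Int)) (p k : Int),
    ((ys.foldl pvStepB (d, p)).1).get? k = pvHFO k (d.get? k) (pvOccP ys p k) := by
  induction ys with
  | nil =>
    intro d p k
    cases h : d.get? k <;> simp [pvHFO, pvOccP, h, pvHF]
  | cons x ys ih =>
    intro d p k
    rw [List.foldl_cons]
    cases h : d.get? x with
    | none =>
      rw [show pvStepB (d, p) x = (d.insert x (p + x, none), p + x) by simp [pvStepB, h]]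
      rw [ih]
      by_cases hxk : x = k
      · subst hxk
        rw [PySem.Dict.get?_insert_self, h]
        simp [pvOccP, pvHFO]
      · rw [PySem.Dict.get?_insert_of_ne _ _ (fun hh => hxk hh.symm)]
        simp [pvOccP, hxk]
    | some v =>
      obtain ⟨mx, best⟩ := v
      rw [show pvStepB (d, p) x
          = (d.insert x (max mx (p + x), pvMinO best (p - mx)), p + x) by
        simp [pvStepB, h, pvBestUpd]]
      rw [ih]
      by_cases hxk : x = k
      · subst hxk
        rw [PySem.Dict.get?_insert_self, h]
        simp [pvOccP, pvHFO, pvHF]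
      · rw [PySem.Dict.get?_insert_of_ne _ _ (fun hh => hxk hh.symm)]
        simp [pvOccP, hxk]

theorem pvStepB_keys (ys : List Int) : ∀ (d : PySem.Dict Int (Int × Option Int)) (p : Int),
    ((ys.foldl pvStepB (d, p)).1).keys = PySem.Set.update d.keys ys := by
  induction ys with
  | nil => intro d p; simp [PySem.Set.update]
  | cons x ys ih =>
    intro d p
    rw [List.foldl_cons, PySem.Set.update_cons]
    cases h : d.get? x with
    | none =>
      rw [show pvStepB (d, p) x = (d.insert x (p + x, none), p + x) by simp [pvStepB, h]]
      rw [ih]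
      have hc : d.contains x = false := (PySem.Dict.get?_eq_none_iff_contains d x).mp h
      rw [PySem.Dict.keys_insert_of_not_contains d _ hc,
          PySem.Set.add_of_not_mem]
      intro hm
      exact absurd ((PySem.Dict.contains_iff_mem_keys d x).mpr hm) (by simp [hc])
    | some v =>
      obtain ⟨mx, best⟩ := v
      rw [show pvStepB (d, p) x
          = (d.insert x (max mx (p + x), pvMinO best (p - mx)), p + x) by
        simp [pvStepB, h, pvBestUpd]]
      rw [ih]
      have hc : d.contains x = true := by
        rw [PySem.Dict.contains_eq_isSome_get?, h]; rfl
      rw [PySem.Dict.keys_insert_of_contains d _ hc,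
          PySem.Set.add_of_mem ((PySem.Dict.contains_iff_mem_keys d x).mp hc)]

theorem pvPfx_zero (nums : List Int) : pvPfx nums 0 = 0 := rfl

theorem pvPfx_cons_succ (x : Int) (xs : List Int) (j : Nat) :
    pvPfx (x :: xs) (j + 1) = x + pvPfx xs j := by
  simp [pvPfx, List.take_succ_cons]

theorem pvPfx_succ (nums : List Int) (t : Nat) (ht : t < nums.length) :
    pvPfx nums (t + 1) = pvPfx nums t + nums.getD t 0 := by
  show (nums.take (t + 1)).sum = (nums.take t).sum + nums.getD t 0
  rw [List.sum_take_succ _ _ ht, List.getD_eq_getElem _ _ ht]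

theorem pvOccP_eq (k : Int) (ys : List Int) : ∀ p,
    pvOccP ys p k = (pvOcc ys k).map (fun j => p + pvPfx ys j) := by
  induction ys with
  | nil => intro p; rfl
  | cons x xs ih =>
    intro p
    show (if x = k then [p] else []) ++ pvOccP xs (p + x) k = _
    rw [ih (p + x)]
    show _ = ((if x = k then [0] else []) ++ (pvOcc xs k).map (· + 1)).map
        (fun j => p + pvPfx (x :: xs) j)
    rw [List.map_append, List.map_map]
    congr 1
    · split_ifs <;> simp [pvPfx_zero]
    · apply List.map_congr_left
      intro j _
      simp only [Function.comp_apply, pvPfx_cons_succ]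
      ring

theorem pvOcc_mem (k : Int) (nums : List Int) : ∀ j ∈ pvOcc nums k,
    j < nums.length ∧ nums.getD j 0 = k := by
  induction nums with
  | nil => intro j hj; cases hj
  | cons x xs ih =>
    intro j hj
    rcases List.mem_append.mp hj with h1 | h2
    · have hx : x = k ∧ j = 0 := by
        by_cases h : x = k
        · simp [h] at h1; exact ⟨h, h1⟩
        · simp [h] at h1
      obtain ⟨hx, rfl⟩ := hx
      exact ⟨by simp, by simpa [List.getD]⟩
    · obtain ⟨j', hj', rfl⟩ := List.mem_map.mp h2
      obtain ⟨h1, h2⟩ := ih j' hj'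
      refine ⟨by simpa using h1, ?_⟩
      simpa [List.getD] using h2

theorem pvOcc_enum (k : Int) (xs : List Int) : ∀ s : Int,
    ((PySem.List.enumerate xs s).filter (fun p => p.2 == k)).map (fun p => p.1)
      = List.map (fun j : Nat => s + (j : Int)) (pvOcc xs k) := by
  induction xs with
  | nil => intro s; rfl
  | cons x xs ih =>
    intro s
    rw [PySem.List.enumerate_cons,
        show pvOcc (x :: xs) k = (if x = k then [0] else []) ++ (pvOcc xs k).map (· + 1) from rfl,
        List.map_append, List.map_map, List.filter_cons]
    have htail : List.map (fun j : Nat => s + (j : Int)) ((pvOcc xs k).map (· + 1)) =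
        List.map (fun j : Nat => (s + 1) + (j : Int)) (pvOcc xs k) := by
      rw [List.map_map]
      apply List.map_congr_left
      intro j _
      simp only [Function.comp_apply]
      push_cast
      ring
    rw [List.map_map] at htail
    by_cases h : x = k
    · rw [if_pos (by simp [h]), List.map_cons, if_pos h, htail, ← ih (s + 1)]
      simp
    · rw [if_neg (by simp [h]), if_neg h, htail, ← ih (s + 1)]
      simp

theorem pvPrefix_inv (nums : List Int) : ∀ t, t ≤ nums.length →
    (PySem.List.pyRange 0 (t : Int)).foldl
      (fun pr i => pr.set (i + 1).toNat (PySem.List.pyGetD pr i 0 + PySem.List.pyGetD nums i 0))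
      (List.replicate (nums.length + 1) 0)
    = (List.range (t + 1)).map (pvPfx nums) ++ List.replicate (nums.length - t) (0 : Int) := by
  intro t
  induction t with
  | zero =>
    intro _
    rw [show ((0 : Nat) : Int) = 0 from rfl, pvRange_nil (le_refl 0), List.foldl_nil]
    have : (List.range 1).map (pvPfx nums) = [0] := by simp [pvPfx_zero]
    rw [this]
    cases nums with
    | nil => rfl
    | cons y ys => simp [List.replicate_succ]
  | succ t ih =>
    intro ht
    have ht' : t ≤ nums.length := by omega
    have hcast : ((t + 1 : Nat) : Int) = (t : Int) + 1 := by push_cast; ring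
    rw [hcast, PySem.List.pyRange_one_succ_right (by positivity), List.foldl_append,
        List.foldl_cons, List.foldl_nil, ih ht']
    set A := (List.range (t + 1)).map (pvPfx nums) with hA
    have hAlen : A.length = t + 1 := by simp [hA]
    have hget : PySem.List.pyGetD (A ++ List.replicate (nums.length - t) (0:Int)) (t : Int) 0
        = pvPfx nums t := by
      rw [PySem.List.pyGetD_natCast, List.getD_append _ _ _ _ (by omega)]
      rw [hA, PySem.List.getD_map_range _ _ _ _ (by omega)]
    have hnums : PySem.List.pyGetD nums (t : Int) 0 = nums.getD t 0 := by
      rw [PySem.List.pyGetD_natCast]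
    rw [hget, hnums]
    rw [show ((t : Int) + 1).toNat = t + 1 by omega]
    rw [List.set_append, if_neg (by omega)]
    rw [hAlen, show t + 1 - (t + 1) = 0 by omega]
    have hrep : List.replicate (nums.length - t) (0:Int)
        = 0 :: List.replicate (nums.length - (t + 1)) (0:Int) := by
      rw [show nums.length - t = (nums.length - (t + 1)) + 1 by omega, List.replicate_succ]
    rw [hrep, List.set_cons_zero]
    rw [show pvPfx nums t + nums.getD t 0 = pvPfx nums (t + 1) from (pvPfx_succ nums t (by omega)).symm]
    rw [show (List.range (t + 1 + 1)).map (pvPfx nums)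
        = A ++ [pvPfx nums (t + 1)] by rw [hA, List.range_succ, List.map_append]; rfl]
    simp

theorem pvPrefix_getD (nums : List Int) (t : Nat) (ht : t ≤ nums.length) :
    PySem.List.pyGetD ((List.range (nums.length + 1)).map (pvPfx nums)) (t : Int) 0
      = pvPfx nums t := by
  rw [PySem.List.pyGetD_natCast, PySem.List.getD_map_range _ _ _ _ (by omega)]

def pvContrib (nums : List Int) (k : Int) : Int :=
  ((pvM (pvApv (pvQs nums k) k)).map (fun b => max 0 b)).getD 0

theorem pvQs_eq_occP (nums : List Int) (k : Int) : pvOccP nums 0 k = pvQs nums k := by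
  rw [pvOccP_eq]
  apply List.map_congr_left
  intro j _
  ring

theorem pvB_eq (nums : List Int) :
    min_total_cost_alt nums = ((PySem.Set.ofList nums).map (fun k => pvContrib nums k)).sum := by
  simp only [min_total_cost_alt]
  set dB := (nums.foldl pvStepB (PySem.Dict.empty, 0)).1 with hdB
  have hkeys : dB.keys = PySem.Set.ofList nums := by
    rw [hdB, pvStepB_keys, PySem.Dict.keys_empty, PySem.Set.update_nil_left]
  have hnodup : dB.keys.Nodup := by rw [hkeys]; exact PySem.Set.nodup_ofList nums
  rw [PySem.Dict.values_eq_map_keys dB hnodup ((0 : Int), (none : Option Int)), hkeys,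
      List.foldl_map]
  rw [PySem.List.foldl_congr_mem _ _ (fun (t : Int) (k : Int) => t + pvContrib nums k) 0
    (by
      intro acc k _
      have hget : dB.get? k = pvHFO k none (pvQs nums k) := by
        rw [hdB, pvStepB_get, PySem.Dict.get?_empty, pvQs_eq_occP]
      rw [PySem.Dict.getD_eq_get?_getD, hget]
      cases hqs : pvQs nums k with
      | nil =>
        rw [show pvHFO k none ([] : List Int) = none from rfl]
        simp [pvContrib, hqs, pvApv, pvM]
      | cons q rqs =>
        rw [show pvHFO k none (q :: rqs) = some (pvHF k (q + k, none) rqs) from rfl]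
        simp only [Option.getD_some]
        rw [pvContrib, hqs, ← pvHF_group k q rqs]
        cases h2 : (pvHF k (q + k, none) rqs).2 <;> simp)]
  rw [PySem.List.foldl_add]
  simp

theorem pvA_getD (nums : List Int) (k : Int) :
    ((PySem.List.enumerate nums 0).foldl
      (fun d p => d.modify p.2 [] (fun l => l ++ [p.1])) PySem.Dict.empty).getD k []
      = pvOccI nums k := by
  have hswap : (PySem.List.enumerate nums 0).foldl
      (fun d p => d.modify p.2 [] (fun l => l ++ [p.1])) PySem.Dict.empty
      = ((PySem.List.enumerate nums 0).map (fun p => (p.2, p.1))).foldl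
          (fun d p => d.modify p.1 [] (fun l => l ++ [p.2])) PySem.Dict.empty := by
    rw [List.foldl_map]
  rw [hswap, PySem.Dict.getD_foldl_modify_append]
  rw [List.filter_map, List.map_map]
  have : (List.filter ((fun p => p.1 == k) ∘ fun p => (p.2, p.1)) (PySem.List.enumerate nums 0))
      = (PySem.List.enumerate nums 0).filter (fun p => p.2 == k) := rfl
  rw [this]
  have : ((fun x => x.2) ∘ fun p => (p.2, p.1)) = fun (p : Int × Int) => p.1 := rfl
  rw [this, pvOcc_enum]
  simp [pvOccI]

theorem pvA_keys (nums : List Int) :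
    ((PySem.List.enumerate nums 0).foldl
      (fun d p => d.modify p.2 [] (fun l => l ++ [p.1])) PySem.Dict.empty).keys
      = PySem.Set.ofList nums := by
  rw [show ((PySem.List.enumerate nums 0).foldl
      (fun d p => d.modify p.2 [] (fun l => l ++ [p.1])) PySem.Dict.empty).keys
      = PySem.Set.update (PySem.Dict.empty (ν := List Int)).keys
          ((PySem.List.enumerate nums 0).map (fun p => p.2)) from
    PySem.Dict.keys_foldl_modify_key _ _ _ _ _]
  rw [PySem.Dict.keys_empty, PySem.List.map_snd_enumerate, PySem.Set.update_nil_left]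

theorem pvIdx_getD (nums : List Int) (k : Int) (t : Nat) (h : t < (pvOcc nums k).length) :
    PySem.List.pyGetD (pvOccI nums k) (t : Int) 0 = ((pvOcc nums k)[t] : Int) := by
  simp [pvOccI, PySem.List.pyGetD_natCast, List.getD_eq_getElem?_getD,
        List.getElem?_eq_getElem h]

theorem pvQs_getD (nums : List Int) (k : Int) (t : Nat) (h : t < (pvOcc nums k).length) :
    PySem.List.pyGetD (pvQs nums k) (t : Int) 0 = pvPfx nums ((pvOcc nums k)[t]) := by
  simp [pvQs, PySem.List.pyGetD_natCast, List.getD_eq_getElem?_getD,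
        List.getElem?_eq_getElem h]

theorem pvA_fold_conv (nums : List Int) (k : Int) (a : Option Int) :
    (PySem.List.pyRange 0 (((pvOccI nums k).length : Int) - 1)).foldl
      (fun mc i =>
        (PySem.List.pyRange (i + 1) ((pvOccI nums k).length : Int)).foldl
          (fun mc j =>
            pvMinO mc (max 0
              (PySem.List.pyGetD ((List.range (nums.length + 1)).map (pvPfx nums))
                  (PySem.List.pyGetD (pvOccI nums k) j 0) 0
               - PySem.List.pyGetD ((List.range (nums.length + 1)).map (pvPfx nums))
                  (PySem.List.pyGetD (pvOccI nums k) i 0 + 1) 0))) mc) a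
    = pvCore (pvQs nums k) k a := by
  have hlen : ((pvOccI nums k).length : Int) = ((pvOcc nums k).length : Int) := by
    simp [pvOccI]
  have hlenq : ((pvQs nums k).length : Int) = ((pvOcc nums k).length : Int) := by
    simp [pvQs]
  have key : ∀ (t : Nat) (ht : t < (pvOcc nums k).length),
      PySem.List.pyGetD ((List.range (nums.length + 1)).map (pvPfx nums))
          (PySem.List.pyGetD (pvOccI nums k) (t : Int) 0) 0
        = pvPfx nums ((pvOcc nums k)[t]'ht) ∧
      PySem.List.pyGetD ((List.range (nums.length + 1)).map (pvPfx nums))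
          (PySem.List.pyGetD (pvOccI nums k) (t : Int) 0 + 1) 0
        = pvPfx nums ((pvOcc nums k)[t]'ht) + k := by
    intro t ht
    have hmem := pvOcc_mem k nums ((pvOcc nums k)[t]) (List.getElem_mem ht)
    rw [pvIdx_getD nums k t ht]
    constructor
    · exact pvPrefix_getD nums _ (by omega)
    · rw [show ((((pvOcc nums k)[t] : Nat) : Int) + 1)
          = (((pvOcc nums k)[t] + 1 : Nat) : Int) by push_cast; ring]
      rw [pvPrefix_getD nums _ (by omega), pvPfx_succ nums _ (by omega), hmem.2]
  unfold pvCore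
  rw [hlen, hlenq]
  apply PySem.List.foldl_congr_mem
  intro acc i hi
  obtain ⟨hi0, hi1⟩ := PySem.List.mem_pyRange_one.mp hi
  apply PySem.List.foldl_congr_mem
  intro acc2 j hj
  obtain ⟨hj0, hj1⟩ := PySem.List.mem_pyRange_one.mp hj
  have hj0' : (0 : Int) ≤ j := by omega
  set ti := i.toNat with hti
  set tj := j.toNat with htj
  have hieq : i = (ti : Int) := (Int.toNat_of_nonneg hi0).symm
  have hjeq : j = (tj : Int) := (Int.toNat_of_nonneg hj0').symm
  have hti' : ti < (pvOcc nums k).length := by omega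
  have htj' : tj < (pvOcc nums k).length := by omega
  rw [hieq, hjeq]
  rw [(key tj htj').1, (key ti hti').2, pvQs_getD nums k tj htj', pvQs_getD nums k ti hti']

theorem pvContrib_small (nums : List Int) (k : Int) (h : (pvOcc nums k).length < 2) :
    pvContrib nums k = 0 := by
  have : pvApv (pvQs nums k) k = [] := by
    rcases hq : pvOcc nums k with _ | ⟨j, _ | ⟨j', t⟩⟩
    · simp [pvQs, hq, pvApv]
    · simp [pvQs, hq, pvApv]
    · rw [hq] at h; simp at h
  simp [pvContrib, this, pvM]

theorem pvA_eq (nums : List Int) :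
    min_total_cost nums = ((PySem.Set.ofList nums).map (fun k => pvContrib nums k)).sum := by
  simp only [min_total_cost]
  have hpr : (PySem.List.pyRange 0 ((nums.length : Int)) 1).foldl
      (fun pr i => pr.set (i + 1).toNat (PySem.List.pyGetD pr i 0 + PySem.List.pyGetD nums i 0))
      (List.replicate ((nums.length : Int).toNat + 1) 0)
      = (List.range (nums.length + 1)).map (pvPfx nums) := by
    have h := pvPrefix_inv nums nums.length le_rfl
    simpa using h
  rw [hpr]
  set dA := (PySem.List.enumerate nums 0).foldl
      (fun d p => d.modify p.2 [] (fun l => l ++ [p.1])) PySem.Dict.empty with hdA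
  have hkeys : dA.keys = PySem.Set.ofList nums := pvA_keys nums
  have hnodup : dA.keys.Nodup := by rw [hkeys]; exact PySem.Set.nodup_ofList nums
  rw [PySem.Dict.items_eq_map_keys dA hnodup ([] : List Int), hkeys, List.foldl_map]
  rw [PySem.List.foldl_congr_mem _ _ (fun (t : Int) (k : Int) => t + pvContrib nums k) 0
    (by
      intro acc k _
      simp only
      rw [show dA.getD k [] = pvOccI nums k from pvA_getD nums k]
      by_cases hsmall : ((pvOccI nums k).length : Int) < 2
      · rw [if_pos hsmall]
        have : (pvOcc nums k).length < 2 := by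
          have : (pvOccI nums k).length = (pvOcc nums k).length := by simp [pvOccI]
          omega
        rw [pvContrib_small nums k this]
        ring
      · rw [if_neg hsmall, pvA_fold_conv nums k none, pvCore_eq, pvComb_none_left,
            pvM_map_max0]
        rfl)]
  rw [PySem.List.foldl_add]
  simp

theorem pv_main (nums : List Int) : min_total_cost nums = min_total_cost_alt nums := by
  rw [pvA_eq, pvB_eq]

-- ===== VERDICT (by name: the statement is the Claim_ definition above) =====
theorem min_total_cost_spec : Claim_equal_min_total_cost := by
  intro nums _
  unfold Spec_min_total_cost
  exact pv_main nums
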